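-- pv_equiv track=rewrite | github.com/peteryej/email_cluster | backend/clustering/preprocessor.py | _is_promotional
-- ===== SOURCE A (Python) =====
-- def _is_promotional(subject: str, body: str) -> bool:
--     """Detect if email is likely promotional"""
--     promo_indicators = [
--         'sale', 'discount', 'offer', 'deal', 'promotion',
--         'coupon', 'save', 'free', 'limited time',
--         'special', 'exclusive', 'buy now', 'shop'
--     ]
--
--     text = f"{subject} {body}".lower()
--     return any(indicator in text for indicator in promo_indicators)
-- ===== SOURCE B (Python) =====
-- def _is_promotional(subject: str, body: str) -> bool:
--     """Detect if email is likely promotional"""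
--     promo_indicators = [
--         'sale', 'discount', 'offer', 'deal', 'promotion',
--         'coupon', 'save', 'free', 'limited time',
--         'special', 'exclusive', 'buy now', 'shop'
--     ]
--
--     text = f"{subject} {body}".lower()
--     # single left-to-right pass: at each position try every keyword as a prefix
--     for i in range(len(text)):
--         for indicator in promo_indicators:
--             if text.startswith(indicator, i):
--                 return True
--     return False
-- ===== Notes on version B (the rewrite author's own statement) =====
-- stated objective: alternative
-- what changed: Replaces 13 independent substring ('in') scans of the text with one left-to-right scan over text positions that tries every keyword as a prefix at each position, returning on the first hit.
import Mathlib
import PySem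

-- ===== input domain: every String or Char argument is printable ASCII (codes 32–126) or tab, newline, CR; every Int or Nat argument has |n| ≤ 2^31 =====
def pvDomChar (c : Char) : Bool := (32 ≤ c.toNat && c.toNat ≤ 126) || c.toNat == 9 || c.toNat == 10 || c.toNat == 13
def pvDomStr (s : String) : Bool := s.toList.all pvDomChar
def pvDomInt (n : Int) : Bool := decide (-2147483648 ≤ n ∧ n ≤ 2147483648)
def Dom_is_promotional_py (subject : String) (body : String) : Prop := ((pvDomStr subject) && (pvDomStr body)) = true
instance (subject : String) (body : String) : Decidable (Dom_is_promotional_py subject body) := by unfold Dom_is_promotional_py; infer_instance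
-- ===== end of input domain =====

-- B replaces A's 13 separate substring scans by one pass over text positions trying each keyword as a prefix (alternative, same cost).

-- the keyword list, shared verbatim by both Pythons
def promoIndicators : List (List Char) :=
  [ "sale".toList, "discount".toList, "offer".toList, "deal".toList, "promotion".toList,
    "coupon".toList, "save".toList, "free".toList, "limited time".toList,
    "special".toList, "exclusive".toList, "buy now".toList, "shop".toList ]

-- ===== PORT A =====
-- text = f"{subject} {body}".lower(); any(indicator in text for indicator in promo_indicators)
def is_promotional_py (subject : String) (body : String) : Bool :=
  let text := PySem.Chars.lower (subject.toList ++ ' ' :: body.toList)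
  promoIndicators.any (fun indicator => PySem.Chars.isIn indicator text)

-- ===== PORT B =====
-- the loop 'for i in range(len(text))' is the structural recursion on the suffixes of text;
-- text.startswith(indicator, i) is exactly startswith on the suffix starting at i (0 ≤ i ≤ len(text))
def promoScan (t : List Char) : Bool :=
  match t with
  | [] => false
  | c :: rest =>
      promoIndicators.any (fun indicator => PySem.Chars.startswith (c :: rest) indicator) || promoScan rest

def is_promotional_py_alt (subject : String) (body : String) : Bool :=
  let text := PySem.Chars.lower (subject.toList ++ ' ' :: body.toList)
  promoScan text

-- ===== PRECONDITION & SPEC =====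
def Spec_is_promotional_py (subject : String) (body : String) (out : Bool) : Prop := out = is_promotional_py_alt subject body
instance (subject : String) (body : String) (out : Bool) : Decidable (Spec_is_promotional_py subject body out) := by unfold Spec_is_promotional_py; infer_instance

-- ===== CLAIM (what is proved, stated in full; the proofs are below) =====
def Claim_equal_is_promotional_py : Prop := ∀ (subject : String) (body : String), Dom_is_promotional_py subject body → Spec_is_promotional_py subject body (is_promotional_py subject body)

-- ===== LEMMAS AND PROOFS =====

-- no promotional keyword is empty
lemma promo_ne_nil : ∀ k ∈ promoIndicators, k ≠ ([] : List Char) := by decide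

-- the position scan finds exactly the keywords occurring as an infix
lemma promoScan_iff (t : List Char) : promoScan t = true ↔ ∃ k ∈ promoIndicators, k <:+: t := by
  induction t with
  | nil =>
      simp only [promoScan, false_iff, Bool.false_eq_true]
      rintro ⟨k, hk, hinf⟩
      exact promo_ne_nil k hk (List.eq_nil_of_infix_nil hinf)
  | cons c rest ih =>
      simp only [promoScan, Bool.or_eq_true, List.any_eq_true, ih]
      constructor
      · rintro (⟨k, hk, hpre⟩ | ⟨k, hk, hinf⟩)
        · exact ⟨k, hk, ((PySem.Chars.startswith_iff _ _).mp hpre).isInfix⟩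
        · exact ⟨k, hk, hinf.trans (List.suffix_cons c rest).isInfix⟩
      · rintro ⟨k, hk, hinf⟩
        rcases (List.infix_cons_iff).mp hinf with hpre | hinf'
        · exact Or.inl ⟨k, hk, (PySem.Chars.startswith_iff _ _).mpr hpre⟩
        · exact Or.inr ⟨k, hk, hinf'⟩

-- ===== VERDICT (by name: the statement is the Claim_ definition above) =====
theorem is_promotional_py_spec : Claim_equal_is_promotional_py := by
  intro subject body _
  unfold Spec_is_promotional_py is_promotional_py is_promotional_py_alt
  rw [Bool.eq_iff_iff, promoScan_iff]
  simp only [List.any_eq_true, PySem.Chars.isIn_iff_infix]
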